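-- pv_equiv track=rewrite | github.com/harmslab/pdbtools | pdbtools/splitnmr.py | splitNMR
-- ===== SOURCE A (Python) =====
-- def splitNMR(pdb):
--     """
--     Split each model in an NMR pdb file into its own pdb.
--     """
--
--     to_strip = ["ENDMDL","MASTER"]
--     pdb = [l for l in pdb if l[0:6] not in to_strip]
--     pdb_splitter = [(l[0:6],i) for i, l in enumerate(pdb)]
--     pdb_splitter = [x[1] for x in pdb_splitter if x[0] == "MODEL "]
--     model_numbers = [pdb[i].split()[1].strip() for i in pdb_splitter]
--     pdb_splitter.append(len(pdb))
--
--     all_models = []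
--     for i in range(1,len(pdb_splitter)):
--         all_models.append((model_numbers[i-1],
--                            pdb[pdb_splitter[i-1]:pdb_splitter[i]]))
--
--     return all_models
-- ===== SOURCE B (Python) =====
-- def splitNMR(pdb):
--     """
--     Split each model in an NMR pdb file into its own pdb.
--     """
--
--     all_models = []
--     current = None  # (model_number, lines) being accumulated, or None
--     for line in pdb:
--         head = line[0:6]
--         if head == "ENDMDL" or head == "MASTER":
--             continue
--         if head == "MODEL ":
--             if current is not None:
--                 all_models.append(current)
--             current = (line.split()[1].strip(), [line])
--         elif current is not None:
--             current[1].append(line)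
--     if current is not None:
--         all_models.append(current)
--     return all_models
-- ===== Notes on version B (the rewrite author's own statement) =====
-- stated objective: simpler
-- what changed: Replaces A's four-pass index pipeline (filter, enumerate, collect MODEL indices, then slice between consecutive indices) by a single pass that accumulates the current model's lines and flushes the (number, lines) tuple whenever a new MODEL line starts; Pre_ excludes inputs with a malformed MODEL line (fewer than two whitespace tokens), on which both A and B raise IndexError.
import Mathlib
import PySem

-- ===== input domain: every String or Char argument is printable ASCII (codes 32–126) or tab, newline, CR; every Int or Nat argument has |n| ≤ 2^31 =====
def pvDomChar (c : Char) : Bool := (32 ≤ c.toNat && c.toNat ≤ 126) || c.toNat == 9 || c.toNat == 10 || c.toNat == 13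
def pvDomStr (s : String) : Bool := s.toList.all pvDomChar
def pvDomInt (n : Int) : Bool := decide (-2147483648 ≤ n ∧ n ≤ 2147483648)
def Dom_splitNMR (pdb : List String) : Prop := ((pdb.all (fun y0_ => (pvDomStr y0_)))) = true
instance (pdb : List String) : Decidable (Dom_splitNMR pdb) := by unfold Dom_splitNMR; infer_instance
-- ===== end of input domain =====

-- B replaces A's multi-pass index/slice pipeline by one streaming pass with a
-- current-model accumulator (objective: simpler).


-- ===== PORT A =====
-- pdb[i].split()[1] raises IndexError in Python on a MODEL line with < 2 tokens;
-- pyGetD's default "" is only reached outside Pre_splitNMR.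
def splitNMR (pdb : List String) : List (String × List String) :=
  let toStrip : List String := ["ENDMDL", "MASTER"]
  let pdb1 := pdb.filter (fun l => !(toStrip.contains (PySem.Str.slice l (some 0) (some 6))))
  let pdbSplitter0 := (PySem.List.enumerate pdb1).map
    (fun p => (PySem.Str.slice p.2 (some 0) (some 6), p.1))
  let pdbSplitter1 := (pdbSplitter0.filter (fun x => x.1 == "MODEL ")).map (fun x => x.2)
  let modelNumbers := pdbSplitter1.map
    (fun i => PySem.Str.strip (PySem.List.pyGetD (PySem.Str.split₀ (PySem.List.pyGetD pdb1 i "")) 1 ""))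
  let pdbSplitter := pdbSplitter1 ++ [(pdb1.length : Int)]
  (PySem.List.pyRange 1 pdbSplitter.length 1).foldl
    (fun allModels i =>
      allModels ++ [(PySem.List.pyGetD modelNumbers (i - 1) "",
                     PySem.List.slice pdb1 (some (PySem.List.pyGetD pdbSplitter (i - 1) 0))
                                           (some (PySem.List.pyGetD pdbSplitter i 0)))])
    []

-- ===== PORT B =====
-- line.split()[1] raises IndexError in Python on a MODEL line with < 2 tokens;
-- pyGetD's default "" is only reached outside Pre_splitNMR.
def splitNMRGo : List String → Option (String × List String) → List (String × List String)
  | [], none => []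
  | [], some current => [current]
  | line :: rest, current =>
    let head := PySem.Str.slice line (some 0) (some 6)
    if head = "ENDMDL" ∨ head = "MASTER" then
      splitNMRGo rest current
    else if head = "MODEL " then
      let started := (PySem.Str.strip (PySem.List.pyGetD (PySem.Str.split₀ line) 1 ""), [line])
      match current with
      | none => splitNMRGo rest (some started)
      | some p => p :: splitNMRGo rest (some started)
    else
      match current with
      | none => splitNMRGo rest none
      | some (n, ls) => splitNMRGo rest (some (n, ls ++ [line]))

def splitNMR_alt (pdb : List String) : List (String × List String) :=
  splitNMRGo pdb none

-- ===== PRECONDITION & SPEC =====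
-- Pre_ excludes exactly the inputs on which Python A raises IndexError:
-- a line whose first six characters are "MODEL " but which has fewer than two
-- whitespace-separated tokens.
def Pre_splitNMR (pdb : List String) : Prop :=
  ∀ l ∈ pdb, PySem.Str.slice l (some 0) (some 6) = "MODEL " → 2 ≤ (PySem.Str.split₀ l).length
instance (pdb : List String) : Decidable (Pre_splitNMR pdb) := by unfold Pre_splitNMR; infer_instance

def pvWitness_splitNMR : List String :=
  ["MODEL     1", "ATOM      1  N   ALA A   1", "ENDMDL",
   "MODEL     2", "ATOM      1  N   ALA A   1", "ENDMDL", "MASTER"]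

def Spec_splitNMR (pdb : List String) (out : List (String × List String)) : Prop := out = splitNMR_alt pdb
instance (pdb : List String) (out : List (String × List String)) : Decidable (Spec_splitNMR pdb out) := by unfold Spec_splitNMR; infer_instance

-- ===== CLAIM (what is proved, stated in full; the proofs are below) =====
def Claim_equal_splitNMR : Prop := ∀ (pdb : List String), Dom_splitNMR pdb → Pre_splitNMR pdb → Spec_splitNMR pdb (splitNMR pdb)

-- ===== LEMMAS AND PROOFS =====

def pvHd (l : String) : String := PySem.Str.slice l (some 0) (some 6)
def pvNum (l : String) : String := PySem.Str.strip (PySem.List.pyGetD (PySem.Str.split₀ l) 1 "")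
def pvGoF : List String → Option (String × List String) → List (String × List String)
  | [], none => []
  | [], some current => [current]
  | l :: rest, current =>
    if pvHd l = "MODEL " then
      match current with
      | none => pvGoF rest (some (pvNum l, [l]))
      | some p => p :: pvGoF rest (some (pvNum l, [l]))
    else
      match current with
      | none => pvGoF rest none
      | some (n, ls) => pvGoF rest (some (n, ls ++ [l]))

theorem pvGo_eq_goF (xs : List String) (cur : Option (String × List String)) :
    splitNMRGo xs cur
      = pvGoF (xs.filter (fun l => !(["ENDMDL", "MASTER"].contains (pvHd l)))) cur := by
  induction xs generalizing cur with
  | nil => cases cur <;> rfl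
  | cons l rest ih =>
    have e : PySem.Str.slice l (some 0) (some 6) = pvHd l := rfl
    by_cases h1 : pvHd l = "ENDMDL" <;> by_cases h2 : pvHd l = "MASTER" <;> by_cases h3 : pvHd l = "MODEL " <;>
      cases cur <;>
      simp_all [splitNMRGo, pvGoF, pvNum]

def pvIdxs : List String → List Nat
  | [] => []
  | l :: rest =>
    if pvHd l = "MODEL " then 0 :: (pvIdxs rest).map (· + 1)
    else (pvIdxs rest).map (· + 1)

def pvNs (xs : List String) : List Nat := pvIdxs xs ++ [xs.length]

theorem pvNs_len (xs : List String) : (pvNs xs).length = (pvIdxs xs).length + 1 := by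
  simp [pvNs]

theorem pvNs_cons_not (l : String) (rest : List String) (h : ¬ pvHd l = "MODEL ") :
    pvNs (l :: rest) = (pvNs rest).map (· + 1) := by
  simp [pvNs, pvIdxs, h, List.map_append]

theorem pvNs_cons_model (l : String) (rest : List String) (h : pvHd l = "MODEL ") :
    pvNs (l :: rest) = 0 :: (pvNs rest).map (· + 1) := by
  simp [pvNs, pvIdxs, h, List.map_append]

theorem pvGetD_map {α β : Type} (ms : List α) (f : α → β) (j : Nat) (d : α) (d' : β)
    (h : j < ms.length) : (ms.map f).getD j d' = f (ms.getD j d) := by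
  rw [List.getD_eq_getElem _ _ (by simpa using h), List.getD_eq_getElem _ _ h, List.getElem_map]

theorem pvGoF_some (xs : List String) (n : String) (acc : List String) :
    pvGoF xs (some (n, acc))
      = (n, acc ++ xs.takeWhile (fun l => !(pvHd l == "MODEL "))) :: pvGoF xs none := by
  induction xs generalizing n acc with
  | nil => simp [pvGoF]
  | cons l rest ih =>
    by_cases h : pvHd l = "MODEL "
    · simp [pvGoF, h]
    · simp [pvGoF, h, ih]

theorem pvTake_i0 (xs : List String) :
    xs.take ((pvNs xs).getD 0 0) = xs.takeWhile (fun l => !(pvHd l == "MODEL ")) := by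
  induction xs with
  | nil => simp [pvNs, pvIdxs]
  | cons l rest ih =>
    by_cases h : pvHd l = "MODEL "
    · simp [pvNs_cons_model l rest h, h]
    · rw [pvNs_cons_not l rest h,
        pvGetD_map (pvNs rest) (· + 1) 0 0 0 (by rw [pvNs_len]; omega),
        List.take_succ_cons, List.takeWhile_cons]
      simp [h]
      simpa [List.getD] using ih

def pvACore (xs : List String) : List (String × List String) :=
  (List.range (pvIdxs xs).length).map (fun j =>
    (pvNum (xs.getD ((pvIdxs xs).getD j 0) ""),
     (xs.drop ((pvNs xs).getD j 0)).take ((pvNs xs).getD (j+1) 0 - (pvNs xs).getD j 0)))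

set_option maxHeartbeats 1000000 in
set_option maxHeartbeats 1000000 in
theorem pvACore_eq_goF (xs : List String) : pvACore xs = pvGoF xs none := by
  induction xs with
  | nil => simp [pvACore, pvIdxs, pvGoF]
  | cons l rest ih =>
    by_cases h : pvHd l = "MODEL "
    · -- MODEL line: peel the first chunk
      have hI : pvIdxs (l :: rest) = 0 :: (pvIdxs rest).map (· + 1) := by
        simp [pvIdxs, h]
      have hN := pvNs_cons_model l rest h
      rw [show pvGoF (l :: rest) none = pvGoF rest (some (pvNum l, [l])) by simp [pvGoF, h],
        pvGoF_some, ← ih, ← pvTake_i0]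
      unfold pvACore
      rw [hI]
      simp only [List.length_cons, List.range_succ_eq_map, List.map_cons, List.map_map]
      refine congr_arg₂ List.cons ?_ ?_
      · -- head element
        rw [hN]
        simp only [List.getD_cons_zero, List.drop_zero, Nat.sub_zero, zero_add,
          List.getD_cons_succ]
        rw [pvGetD_map (pvNs rest) (· + 1) 0 0 0 (by rw [pvNs_len]; omega)]
        simp [List.take_succ_cons]
      · -- tail
        rw [List.length_map]
        apply List.map_congr_left
        intro j hj
        rw [List.mem_range] at hj
        have hjN : j < (pvNs rest).length := by rw [pvNs_len]; omega
        have hjN1 : j + 1 < (pvNs rest).length := by rw [pvNs_len]; omega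
        simp only [Function.comp_apply, Nat.succ_eq_add_one, hN, List.getD_cons_succ]
        rw [pvGetD_map (pvIdxs rest) (· + 1) j 0 0 hj,
          pvGetD_map (pvNs rest) (· + 1) j 0 0 hjN,
          pvGetD_map (pvNs rest) (· + 1) (j+1) 0 0 hjN1]
        simp [List.drop_succ_cons, Nat.succ_sub_succ]
    · -- non-MODEL line: whole result unchanged
      have hI : pvIdxs (l :: rest) = (pvIdxs rest).map (· + 1) := by
        simp [pvIdxs, h]
      have hN := pvNs_cons_not l rest h
      rw [show pvGoF (l :: rest) none = pvGoF rest none by simp [pvGoF, h], ← ih]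
      unfold pvACore
      rw [hI, List.length_map]
      apply List.map_congr_left
      intro j hj
      rw [List.mem_range] at hj
      have hjN : j < (pvNs rest).length := by rw [pvNs_len]; omega
      have hjN1 : j + 1 < (pvNs rest).length := by rw [pvNs_len]; omega
      rw [hN, pvGetD_map (pvIdxs rest) (· + 1) j 0 0 hj,
        pvGetD_map (pvNs rest) (· + 1) j 0 0 hjN,
        pvGetD_map (pvNs rest) (· + 1) (j+1) 0 0 hjN1]
      simp [List.drop_succ_cons, Nat.succ_sub_succ]

theorem pvIdxs_enum (xs : List String) (s : Int) :
    ((((PySem.List.enumerate xs s).map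
        (fun p => (PySem.Str.slice p.2 (some 0) (some 6), p.1))).filter
          (fun x => x.1 == "MODEL ")).map (fun x => x.2))
      = (pvIdxs xs).map (fun (n : Nat) => s + (n : Int)) := by
  induction xs generalizing s with
  | nil => simp [PySem.List.enumerate_nil, pvIdxs]
  | cons l rest ih =>
    have e : PySem.Str.slice l (some 0) (some 6) = pvHd l := rfl
    by_cases h : pvHd l = "MODEL " <;>
      simp [PySem.List.enumerate_cons, pvIdxs, h, e, ih,
        List.map_map, Function.comp_def] <;>
      · intro a _
        ring
theorem pvA_eq_core (pdb : List String) :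
    splitNMR pdb
      = pvACore (pdb.filter (fun l => !(["ENDMDL", "MASTER"].contains (pvHd l)))) := by
  simp only [splitNMR]
  rw [show (fun l => !(["ENDMDL", "MASTER"] : List String).contains
        (PySem.Str.slice l (some 0) (some 6)))
      = (fun l => !(["ENDMDL", "MASTER"] : List String).contains (pvHd l)) from rfl]
  set xs := pdb.filter (fun l => !(["ENDMDL", "MASTER"].contains (pvHd l))) with hxs
  simp only [pvIdxs_enum xs 0, zero_add]
  have hsplit : ((pvIdxs xs).map (fun (n : Nat) => (n : Int))) ++ [(xs.length : Int)]
      = (pvNs xs).map (fun (n : Nat) => (n : Int)) := by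
    simp [pvNs]
  have hnum : ((pvIdxs xs).map (fun (n : Nat) => (n : Int))).map
      (fun i => PySem.Str.strip (PySem.List.pyGetD (PySem.Str.split₀ (PySem.List.pyGetD xs i "")) 1 ""))
      = (pvIdxs xs).map (fun n => pvNum (xs.getD n "")) := by
    rw [List.map_map]
    apply List.map_congr_left
    intro a _
    simp [pvNum, PySem.List.pyGetD_natCast]
  rw [hsplit, hnum, PySem.List.foldl_append_singleton_eq_map, List.nil_append,
    List.length_map, PySem.List.pyRange_one]
  have hk : (((pvNs xs).length : Int) - 1).toNat = (pvIdxs xs).length := by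
    rw [pvNs_len]; omega
  rw [hk, List.map_map]
  unfold pvACore
  apply List.map_congr_left
  intro j hj
  rw [List.mem_range] at hj
  have hjN : j < (pvNs xs).length := by rw [pvNs_len]; omega
  have hjN1 : j + 1 < (pvNs xs).length := by rw [pvNs_len]; omega
  have e1 : (((j + 1 : Nat)) : Int) - 1 = ((j : Nat) : Int) := by push_cast; ring
  have e2 : (1 : Int) + (j : Int) = (((j + 1 : Nat)) : Int) := by push_cast; ring
  simp only [Function.comp_apply, e1, e2, PySem.List.pyGetD_natCast]
  rw [pvGetD_map (pvIdxs xs) (fun n => pvNum (xs.getD n "")) j 0 "" hj,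
    pvGetD_map (pvNs xs) (fun (n : Nat) => (n : Int)) j 0 0 hjN,
    pvGetD_map (pvNs xs) (fun (n : Nat) => (n : Int)) (j+1) 0 0 hjN1,
    PySem.List.slice_natCast]

-- ===== VERDICT (by name: the statement is the Claim_ definition above) =====
theorem splitNMR_spec : Claim_equal_splitNMR := by
  intro pdb _ _
  unfold Spec_splitNMR splitNMR_alt
  rw [pvA_eq_core, pvACore_eq_goF, pvGo_eq_goF]
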